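-- pv_equiv track=rewrite | github.com/LukasEder1/CKE_streamlit | sentence_comparision.py | unified_diffs
-- ===== SOURCE A (Python) =====
-- def unified_diffs(siblings):
--     first = siblings[0]
--     unified_content = []
--     for i in range(len(first)):
--         word = first[i]
--         if all([word in sibling for sibling in siblings[1:]]):
--             unified_content.append(word)
--
--     return unified_content
-- ===== SOURCE B (Python) =====
-- def unified_diffs(siblings):
--     first = siblings[0]
--     rest = siblings[1:]
--     if not rest:
--         return list(first)
--     common = set(rest[0])
--     for s in rest[1:]:
--         common &= set(s)
--     return [w for w in first if w in common]
-- ===== Notes on version B (the rewrite author's own statement) =====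
-- stated objective: alternative
-- what changed: B intersects the later siblings into one common set once and then filters first with a single membership test per word, instead of rescanning every sibling (rebuilding siblings[1:]) for each word of first.
import Mathlib
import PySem

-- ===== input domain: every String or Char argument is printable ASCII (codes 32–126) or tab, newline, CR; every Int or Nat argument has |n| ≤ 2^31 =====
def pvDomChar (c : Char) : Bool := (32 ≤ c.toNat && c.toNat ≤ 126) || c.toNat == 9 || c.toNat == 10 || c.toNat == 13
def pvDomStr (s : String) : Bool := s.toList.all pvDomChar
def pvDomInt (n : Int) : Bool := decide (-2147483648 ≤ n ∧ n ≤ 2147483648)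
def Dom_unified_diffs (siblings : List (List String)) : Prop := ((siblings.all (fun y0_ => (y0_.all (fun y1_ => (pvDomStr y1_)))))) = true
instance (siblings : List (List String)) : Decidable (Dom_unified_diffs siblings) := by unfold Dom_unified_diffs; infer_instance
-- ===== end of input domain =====

-- B builds the intersection of the later siblings once and filters first through it,
-- instead of rescanning every later sibling for each word of first.

-- ===== PORT A =====
def unified_diffs (siblings : List (List String)) : List String :=
  let first := PySem.List.pyGetD siblings 0 []   -- siblings[0]; total form, Pre_ demands siblings ≠ []
  (PySem.List.pyRange 0 (first.length : Int) 1).foldl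
    (fun acc i =>
      let word := PySem.List.pyGetD first i ""
      if (PySem.List.slice siblings (some 1) none).all (fun sibling => sibling.contains word) then
        acc ++ [word]
      else acc)
    []

-- ===== PORT B =====
def unified_diffs_alt (siblings : List (List String)) : List String :=
  let first := PySem.List.pyGetD siblings 0 []   -- siblings[0]; total form, Pre_ demands siblings ≠ []
  match PySem.List.slice siblings (some 1) none with
  | [] => first
  | r0 :: rs =>
    let common := rs.foldl (fun c s => PySem.Set.inter c (PySem.Set.ofList s)) (PySem.Set.ofList r0)
    first.filter (fun w => PySem.Set.contains common w)

-- ===== PRECONDITION & SPEC =====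
-- Pre_ excludes only the empty list, on which A raises IndexError (siblings[0]).
def Pre_unified_diffs (siblings : List (List String)) : Prop := siblings ≠ []
instance (siblings : List (List String)) : Decidable (Pre_unified_diffs siblings) := by unfold Pre_unified_diffs; infer_instance
def pvWitness_unified_diffs : List (List String) := [["a", "b"], ["b"]]
def Spec_unified_diffs (siblings : List (List String)) (out : List String) : Prop := out = unified_diffs_alt siblings
instance (siblings : List (List String)) (out : List String) : Decidable (Spec_unified_diffs siblings out) := by unfold Spec_unified_diffs; infer_instance

-- ===== CLAIM (what is proved, stated in full; the proofs are below) =====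
def Claim_equal_unified_diffs : Prop := ∀ (siblings : List (List String)), Dom_unified_diffs siblings → Pre_unified_diffs siblings → Spec_unified_diffs siblings (unified_diffs siblings)

-- ===== LEMMAS AND PROOFS =====

lemma mem_foldl_inter (rs : List (List String)) (c : PySem.Set String) (w : String) :
    w ∈ rs.foldl (fun c s => PySem.Set.inter c (PySem.Set.ofList s)) c ↔
      w ∈ c ∧ ∀ s ∈ rs, w ∈ s := by
  induction rs generalizing c with
  | nil => simp
  | cons s rs ih =>
    simp [List.foldl, ih, PySem.Set.mem_inter, PySem.Set.mem_ofList]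
    tauto

-- ===== VERDICT (by name: the statement is the Claim_ definition above) =====
theorem unified_diffs_spec : Claim_equal_unified_diffs := by
  intro siblings _ hpre
  obtain ⟨f, rest, rfl⟩ : ∃ f rest, siblings = f :: rest := by
    cases siblings with
    | nil => exact absurd rfl hpre
    | cons f rest => exact ⟨f, rest, rfl⟩
  unfold Spec_unified_diffs unified_diffs unified_diffs_alt
  simp only [PySem.List.pyGetD_zero_cons, PySem.List.slice_from_one, List.tail_cons]
  rw [PySem.List.foldl_pyRange_pyGetD' f ""
    (fun acc w => if (rest.all fun sibling => sibling.contains w) then acc ++ [w] else acc)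
    [] (le_refl 0)]
  rw [PySem.List.foldl_append_if_eq_filter]
  simp only [Int.toNat_zero, List.drop_zero]
  cases rest with
  | nil => simp
  | cons r0 rs =>
    simp only [List.nil_append]
    apply List.filter_congr
    intro w _
    simp only [List.all_cons]
    rw [Bool.eq_iff_iff]
    simp [mem_foldl_inter, PySem.Set.mem_ofList]
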